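-- pv_equiv track=rewrite | github.com/bxduy/PYTHON_PTIT | mai_nha.py | solve
-- ===== SOURCE A (Python) =====
-- def solve(a, n):
--     cnt = 100000000
--     for i in range(n):
--         tmp = 0
--         check = True
--         for j in range(n):
--             res = (a[i] - abs(i - j))
--             if res > 0:
--                 tmp += abs(a[j] - res)
--             else:
--                 check = False
--                 break
--         if check:
--             cnt = min(cnt, tmp)
--     return cnt
-- ===== SOURCE B (Python) =====
-- def solve(a, n):
--     # Different algorithm: two staged sweeps over the transformed keys a[j]-j
--     # (forward) and a[j]+j (backward), each maintaining a sorted multiset of the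
--     # prefix; the cost at each position comes from the count/sum split identity
--     # at the insertion point instead of a fresh scan of |a[j] - res| per peak.
--     def half_costs(vals):
--         # out[i] = sum of |vals[j] - vals[i]| over j <= i
--         out = []
--         srt = []      # sorted multiset of the processed prefix
--         tot = 0       # its running sum
--         for x in vals:
--             k = 0
--             while k < len(srt) and srt[k] < x:
--                 k += 1
--             srt.insert(k, x)
--             tot += x
--             low = sum(srt[:k])
--             out.append(x * k - low + (tot - low) - x * (len(srt) - k))
--         return out
--
--     b = [a[i] - i for i in range(n)]
--     c = [a[i] + i for i in range(n)]
--     left = half_costs(b)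
--     right = half_costs(c[::-1])[::-1]
--     best = 100000000
--     for i in range(n):
--         # roof fits iff it stays positive at both ends
--         if a[i] > i and a[i] > n - 1 - i:
--             best = min(best, left[i] + right[i])
--     return best
-- ===== Notes on version B (the rewrite author's own statement) =====
-- stated objective: alternative
-- what changed: Replaces A's per-peak rescans (with break) by two staged sweeps over the transformed keys a[j]-j (forward) and a[j]+j (backward), each maintaining a sorted multiset of the prefix so every position's cost comes from the count/sum split identity at the insertion point, combined with a closed-form end-positivity test per peak.
import Mathlib
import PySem

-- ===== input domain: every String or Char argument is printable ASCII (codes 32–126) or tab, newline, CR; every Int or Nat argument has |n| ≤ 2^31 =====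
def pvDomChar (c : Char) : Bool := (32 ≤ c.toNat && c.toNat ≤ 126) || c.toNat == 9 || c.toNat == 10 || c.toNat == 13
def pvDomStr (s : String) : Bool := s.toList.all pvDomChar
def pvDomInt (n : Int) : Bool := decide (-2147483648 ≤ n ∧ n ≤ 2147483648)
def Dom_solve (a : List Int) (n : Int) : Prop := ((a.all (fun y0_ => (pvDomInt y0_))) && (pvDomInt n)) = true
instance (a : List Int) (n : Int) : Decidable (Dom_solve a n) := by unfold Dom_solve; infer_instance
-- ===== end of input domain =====

-- B computes the costs by two staged sweeps over the transformed keys a[j]-j / a[j]+j, each maintaining a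
-- sorted multiset of the prefix and using the count/sum split identity at the insertion point, with a
-- closed-form end-positivity test per peak (objective: alternative).


-- ===== PORT A =====
-- inner 'for j in range(n)' loop with its early break: returns (tmp, check)
def solveInner (a : List Int) (i : Int) : List Int → Int → Int × Bool
  | [], tmp => (tmp, true)
  | j :: js, tmp =>
    let res := PySem.List.pyGetD a i 0 - |i - j|
    if res > 0 then solveInner a i js (tmp + |PySem.List.pyGetD a j 0 - res|)
    else (tmp, false)

def solve (a : List Int) (n : Int) : Int :=
  (PySem.List.pyRange 0 n 1).foldl (fun cnt i =>
    let r := solveInner a i (PySem.List.pyRange 0 n 1) 0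
    if r.2 then min cnt r.1 else cnt) 100000000

-- ===== PORT B =====
-- one step of half_costs' for-loop; the while loop computing k is the length of the maximal (< x)-prefix
def halfStep (st : List Int × Int × List Int) (x : Int) : List Int × Int × List Int :=
  let srt := st.1
  let k : Nat := (srt.takeWhile (fun y => decide (y < x))).length   -- while k < len(srt) and srt[k] < x: k += 1
  let srt' := PySem.List.insert srt (k : Int) x                     -- srt.insert(k, x)
  let tot' := st.2.1 + x
  let low := (PySem.List.slice srt' none (some (k : Int))).sum      -- sum(srt[:k])
  (srt', tot', st.2.2 ++ [x * k - low + (tot' - low) - x * ((srt'.length : Int) - k)])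

def halfCosts (vals : List Int) : List Int :=
  (vals.foldl halfStep ([], 0, [])).2.2

def solve_alt (a : List Int) (n : Int) : Int :=
  let b := (PySem.List.pyRange 0 n 1).map (fun i => PySem.List.pyGetD a i 0 - i)
  let c := (PySem.List.pyRange 0 n 1).map (fun i => PySem.List.pyGetD a i 0 + i)
  let left := halfCosts b
  let right := (halfCosts c.reverse).reverse                        -- half_costs(c[::-1])[::-1]
  (PySem.List.pyRange 0 n 1).foldl (fun best i =>
    if PySem.List.pyGetD a i 0 > i ∧ PySem.List.pyGetD a i 0 > n - 1 - i then
      min best (PySem.List.pyGetD left i 0 + PySem.List.pyGetD right i 0)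
    else best) 100000000

-- ===== PRECONDITION & SPEC =====
-- A raises IndexError iff n > len(a) (the outer loop then always reaches i = len(a)); excluded here.
def Pre_solve (a : List Int) (n : Int) : Prop := n ≤ (a.length : Int)
instance (a : List Int) (n : Int) : Decidable (Pre_solve a n) := by unfold Pre_solve; infer_instance
def pvWitness_solve : List Int × Int := ([3, 2, 2], 3)
def Spec_solve (a : List Int) (n : Int) (out : Int) : Prop := out = solve_alt a n
instance (a : List Int) (n : Int) (out : Int) : Decidable (Spec_solve a n out) := by unfold Spec_solve; infer_instance

-- ===== CLAIM (what is proved, stated in full; the proofs are below) =====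
def Claim_equal_solve : Prop := ∀ (a : List Int) (n : Int), Dom_solve a n → Pre_solve a n → Spec_solve a n (solve a n)

-- ===== LEMMAS AND PROOFS =====

-- the sum-of-absolute-differences a half-cost entry stands for
def costIn (L : List Int) (x : Int) : Int := (L.map (fun y => |y - x|)).sum

-- the list half_costs is proved to produce
def costsList (p : List Int) : List Int :=
  (List.range p.length).map (fun t => costIn (p.take (t + 1)) (p.getD t 0))

theorem costIn_perm (x : Int) {L M : List Int} (h : L.Perm M) : costIn L x = costIn M x :=
  (h.map _).sum_eq

-- count/sum split identity:  Σ|y-x| = x·k − low + (tot − low) − x·(len − k)  with k, low over the y < x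
theorem costIn_split (x : Int) (L : List Int) :
    costIn L x = x * ((L.filter (fun y => decide (y < x))).length : Int)
      - (L.filter (fun y => decide (y < x))).sum
      + (L.sum - (L.filter (fun y => decide (y < x))).sum)
      - x * ((L.length : Int) - ((L.filter (fun y => decide (y < x))).length : Int)) := by
  induction L with
  | nil => simp [costIn]
  | cons y L ih =>
    by_cases h : y < x
    · have hy : |y - x| = x - y := by rw [abs_of_nonpos (by omega)]; ring
      simp only [costIn, List.map_cons, List.sum_cons, List.filter_cons, h, decide_true,
        List.length_cons, List.sum_cons] at *
      push_cast [List.length_cons, List.sum_cons]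
      linear_combination ih + hy
    · have hy : |y - x| = y - x := by rw [abs_of_nonneg (by omega)]
      simp only [costIn, List.map_cons, List.sum_cons, List.filter_cons, h, decide_false,
        List.length_cons, List.sum_cons] at *
      push_cast [List.length_cons, List.sum_cons]
      linear_combination ih + hy

theorem takeWhile_lt_sorted (x : Int) (L : List Int) (hs : L.Pairwise (· ≤ ·)) :
    L.takeWhile (fun y => decide (y < x)) = L.filter (fun y => decide (y < x)) := by
  induction L with
  | nil => rfl
  | cons y L ih =>
    rcases List.pairwise_cons.1 hs with ⟨hy, hL⟩
    by_cases h : y < x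
    · simp [h, ih hL]
    · have hnil : L.filter (fun y => decide (y < x)) = [] :=
        List.filter_eq_nil_iff.2 (fun z hz => by simpa using not_lt.2 (le_trans (not_lt.1 h) (hy z hz)))
      simp [h, hnil]

theorem dropWhile_lt_sorted (x : Int) (L : List Int) (hs : L.Pairwise (· ≤ ·)) :
    L.dropWhile (fun y => decide (y < x)) = L.filter (fun y => decide (x ≤ y)) := by
  induction L with
  | nil => rfl
  | cons y L ih =>
    rcases List.pairwise_cons.1 hs with ⟨hy, hL⟩
    by_cases h : y < x
    · have h2 : ¬ x ≤ y := by omega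
      simp [h, h2, ih hL]
    · have hself : L.filter (fun y => decide (x ≤ y)) = L :=
        List.filter_eq_self.2 (fun z hz => by simpa using le_trans (not_lt.1 h) (hy z hz))
      have h2 : x ≤ y := not_lt.1 h
      simp [h2, hself]

theorem costsList_snoc (p : List Int) (x : Int) :
    costsList (p ++ [x]) = costsList p ++ [costIn (p ++ [x]) x] := by
  unfold costsList
  rw [List.length_append, List.length_singleton, List.range_succ, List.map_append]
  congr 1
  · apply List.map_congr_left
    intro t ht
    rw [List.mem_range] at ht
    rw [List.take_append_of_le_length (by omega), List.getD_append _ _ _ _ ht]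
  · have h2 : List.take (p.length + 1) (p ++ [x]) = p ++ [x] :=
      List.take_of_length_le (by simp)
    simp [h2]

-- one halfStep advances the invariant state
theorem halfStep_adv (p srt : List Int) (x : Int) (out : List Int)
    (hperm : srt.Perm p) (hsort : srt.Pairwise (· ≤ ·)) :
    halfStep (srt, p.sum, out) x
      = (srt.takeWhile (fun y => decide (y < x)) ++ x :: srt.dropWhile (fun y => decide (y < x)),
         (p ++ [x]).sum, out ++ [costIn (p ++ [x]) x]) ∧
      (srt.takeWhile (fun y => decide (y < x)) ++ x :: srt.dropWhile (fun y => decide (y < x))).Perm (p ++ [x]) ∧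
      (srt.takeWhile (fun y => decide (y < x)) ++ x :: srt.dropWhile (fun y => decide (y < x))).Pairwise (· ≤ ·) := by
  have hsplit : srt.takeWhile (fun y => decide (y < x)) ++ srt.dropWhile (fun y => decide (y < x)) = srt :=
    List.takeWhile_append_dropWhile
  set tk := srt.takeWhile (fun y => decide (y < x)) with htk
  set dw := srt.dropWhile (fun y => decide (y < x)) with hdw
  have hkle : tk.length ≤ srt.length := by
    conv_rhs => rw [← hsplit]
    simp
  have htake : srt.take tk.length = tk := by
    conv_lhs => rw [← hsplit]
    exact List.take_left
  have hdrop : srt.drop tk.length = dw := by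
    conv_lhs => rw [← hsplit]
    exact List.drop_left
  have hins : PySem.List.insert srt ((tk.length : Nat) : Int) x = tk ++ x :: dw := by
    rw [PySem.List.insert_natCast srt tk.length x hkle, htake, hdrop]
  have hperm2 : (tk ++ x :: dw).Perm (p ++ [x]) := by
    refine List.Perm.trans List.perm_middle ?_
    rw [hsplit]
    exact List.Perm.trans (hperm.cons x) (List.perm_append_singleton x p).symm
  have htkmem : ∀ u ∈ tk, u < x := fun u hu => by
    simpa using List.mem_takeWhile_imp hu
  have hdwmem : ∀ v ∈ dw, x ≤ v := by
    intro v hv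
    rw [hdw, dropWhile_lt_sorted x srt hsort] at hv
    simpa using List.of_mem_filter hv
  have hsort2 : (tk ++ x :: dw).Pairwise (· ≤ ·) := by
    rw [List.pairwise_append]
    refine ⟨hsort.sublist (htk ▸ List.takeWhile_sublist _), ?_, ?_⟩
    · rw [List.pairwise_cons]
      exact ⟨hdwmem, hsort.sublist (hdw ▸ List.dropWhile_sublist _)⟩
    · intro u hu v hv
      rcases List.mem_cons.1 hv with rfl | hv
      · exact (htkmem u hu).le
      · exact ((htkmem u hu).le).trans (hdwmem v hv)
  have hlow : PySem.List.slice (tk ++ x :: dw) none (some ((tk.length : Nat) : Int)) = tk := by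
    rw [PySem.List.slice_to_natCast, List.take_left]
  have hcost : x * ((tk.length : Nat) : Int) - tk.sum + ((p.sum + x) - tk.sum)
      - x * (((tk ++ x :: dw).length : Int) - ((tk.length : Nat) : Int)) = costIn (p ++ [x]) x := by
    have h1 : costIn (p ++ [x]) x = costIn srt x := by
      have : costIn (p ++ [x]) x = costIn (x :: srt) x :=
        costIn_perm x (List.Perm.trans (List.perm_append_singleton x p) (hperm.symm.cons x))
      rw [this]
      simp [costIn]
    have h2 := costIn_split x srt
    have hfil : srt.filter (fun y => decide (y < x)) = tk := (takeWhile_lt_sorted x srt hsort).symm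
    have hsum : srt.sum = p.sum := hperm.sum_eq
    have hlen : ((tk ++ x :: dw).length : Int) = (srt.length : Int) + 1 := by
      rw [← hsplit]
      push_cast [List.length_append, List.length_cons]
      ring
    rw [h1, h2, hfil, hsum, hlen]
    ring
  refine ⟨?_, hperm2, hsort2⟩
  show ((fun st x => halfStep st x) (srt, p.sum, out) x) = _
  unfold halfStep
  simp only [← htk, hins, hlow]
  rw [Prod.mk.injEq, Prod.mk.injEq]
  exact ⟨rfl, by simp, by rw [hcost]⟩

-- foldl invariant: half_costs produces exactly the costs list
theorem halfCosts_loop (vals : List Int) : ∀ (p srt : List Int),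
    srt.Perm p → srt.Pairwise (· ≤ ·) →
    (vals.foldl halfStep (srt, p.sum, costsList p)).2.2 = costsList (p ++ vals) := by
  induction vals with
  | nil => intro p srt _ _; simp
  | cons x vals ih =>
    intro p srt hperm hsort
    rw [List.foldl_cons]
    obtain ⟨heq, hperm', hsort'⟩ := halfStep_adv p srt x (costsList p) hperm hsort
    rw [heq, ← costsList_snoc]
    have := ih (p ++ [x]) _ hperm' hsort'
    rw [List.append_assoc] at this
    simpa using this

theorem halfCosts_eq (vals : List Int) : halfCosts vals = costsList vals := by
  have := halfCosts_loop vals [] [] (List.Perm.refl _) (by simp)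
  simpa [halfCosts, costsList] using this

-- ===== lemmas about A's inner loop (as in the straight split proof) =====
theorem solveInner_snd (a : List Int) (i : Int) (js : List Int) (t : Int) :
    (solveInner a i js t).2 = decide (∀ j ∈ js, PySem.List.pyGetD a i 0 - |i - j| > 0) := by
  induction js generalizing t with
  | nil => simp [solveInner]
  | cons j js ih =>
    simp only [solveInner]
    by_cases h : PySem.List.pyGetD a i 0 - |i - j| > 0
    · rw [if_pos h, ih]
      have h' : |i - j| < PySem.List.pyGetD a i 0 := by linarith
      simp [h']
    · rw [if_neg h]
      have h' : ¬ (|i - j| < PySem.List.pyGetD a i 0) := fun hc => h (by linarith)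
      simp [h']

theorem solveInner_fst (a : List Int) (i : Int) (js : List Int) (t : Int)
    (h : ∀ j ∈ js, PySem.List.pyGetD a i 0 - |i - j| > 0) :
    (solveInner a i js t).1
      = t + (js.map (fun j => |PySem.List.pyGetD a j 0 - (PySem.List.pyGetD a i 0 - |i - j|)|)).sum := by
  induction js generalizing t with
  | nil => simp [solveInner]
  | cons j js ih =>
    have hj := h j (List.mem_cons_self ..)
    simp only [solveInner, if_pos hj]
    rw [ih _ (fun x hx => h x (List.mem_cons_of_mem _ hx))]
    simp [List.sum_cons]
    ring

theorem valid_iff (h : Int) (i n : Int) (hi0 : 0 ≤ i) (hin : i < n) :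
    (∀ j ∈ PySem.List.pyRange 0 n 1, h - |i - j| > 0) ↔ (h > i ∧ h > n - 1 - i) := by
  simp only [PySem.List.mem_pyRange_one]
  constructor
  · intro H
    have h1 := H 0 ⟨le_refl 0, by omega⟩
    have h2 := H (n - 1) ⟨by omega, by omega⟩
    have e1 : |i - 0| = i := by rw [abs_of_nonneg]; omega; omega
    have e2 : |i - (n - 1)| = n - 1 - i := by rw [abs_of_nonpos]; omega; omega
    omega
  · intro H j ⟨hj0, hjn⟩
    rcases abs_cases (i - j) with ⟨he, _⟩ | ⟨he, _⟩ <;> omega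

-- A's per-peak cost splits into the two transformed half-sums (j = i counted once in each, the right term zero)
theorem cost_eq (a : List Int) (n i : Int) (hi0 : 0 ≤ i) (hin : i < n) :
    ((PySem.List.pyRange 0 n 1).map
        (fun j => |PySem.List.pyGetD a j 0 - (PySem.List.pyGetD a i 0 - |i - j|)|)).sum
      = ((PySem.List.pyRange 0 (i + 1) 1).map
          (fun j => |(PySem.List.pyGetD a j 0 - j) - (PySem.List.pyGetD a i 0 - i)|)).sum
        + ((PySem.List.pyRange (i + 1) n 1).map
          (fun j => |(PySem.List.pyGetD a j 0 + j) - (PySem.List.pyGetD a i 0 + i)|)).sum := by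
  rw [PySem.List.pyRange_one_append 0 (i + 1) n (by omega) (by omega), List.map_append,
    List.sum_append]
  congr 1
  · apply congrArg
    apply List.map_congr_left
    intro j hj
    rw [PySem.List.mem_pyRange_one] at hj
    have : |i - j| = i - j := by rw [abs_of_nonneg (by omega)]
    rw [this]; ring_nf
  · apply congrArg
    apply List.map_congr_left
    intro j hj
    rw [PySem.List.mem_pyRange_one] at hj
    have : |i - j| = j - i := by rw [abs_of_nonpos (by omega)]; ring
    rw [this]; ring_nf

-- B's left[i] is the left half-sum
theorem left_at (a : List Int) (n i : Int) (hi0 : 0 ≤ i) (hin : i < n) :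
    PySem.List.pyGetD (halfCosts ((PySem.List.pyRange 0 n 1).map
        (fun j => PySem.List.pyGetD a j 0 - j))) i 0
      = ((PySem.List.pyRange 0 (i + 1) 1).map
          (fun j => |(PySem.List.pyGetD a j 0 - j) - (PySem.List.pyGetD a i 0 - i)|)).sum := by
  have hlb : ((PySem.List.pyRange 0 n 1).map (fun j => PySem.List.pyGetD a j 0 - j)).length = n.toNat := by
    simp [PySem.List.length_pyRange_one]
  rw [halfCosts_eq]
  rw [PySem.List.pyGetD_eq_getElem _ 0 hi0 (by simp [costsList, hlb]; omega)]
  simp only [costsList, List.getElem_map, List.getElem_range]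
  have hget : ((PySem.List.pyRange 0 n 1).map (fun j => PySem.List.pyGetD a j 0 - j)).getD i.toNat 0
      = PySem.List.pyGetD a i 0 - i := by
    rw [List.getD_eq_getElem _ _ (by rw [hlb]; omega)]
    simp only [List.getElem_map, PySem.List.getElem_pyRange_one]
    rw [show (0 : Int) + ((i.toNat : Nat) : Int) = i from by omega]
  have htake : ((PySem.List.pyRange 0 n 1).map (fun j => PySem.List.pyGetD a j 0 - j)).take (i.toNat + 1)
      = (PySem.List.pyRange 0 (i + 1) 1).map (fun j => PySem.List.pyGetD a j 0 - j) := by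
    rw [PySem.List.pyRange_one_append 0 (i + 1) n (by omega) (by omega), List.map_append]
    rw [List.take_left' (by simp [PySem.List.length_pyRange_one]; omega)]
  rw [hget, htake]
  simp [costIn, List.map_map, Function.comp_def]

-- B's right[i] is the right half-sum plus the zero j = i term
theorem right_at (a : List Int) (n i : Int) (hi0 : 0 ≤ i) (hin : i < n) :
    PySem.List.pyGetD ((halfCosts ((PySem.List.pyRange 0 n 1).map
        (fun j => PySem.List.pyGetD a j 0 + j)).reverse).reverse) i 0
      = ((PySem.List.pyRange i n 1).map
          (fun j => |(PySem.List.pyGetD a j 0 + j) - (PySem.List.pyGetD a i 0 + i)|)).sum := by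
  have hlc : ((PySem.List.pyRange 0 n 1).map (fun j => PySem.List.pyGetD a j 0 + j)).length = n.toNat := by
    simp [PySem.List.length_pyRange_one]
  rw [halfCosts_eq]
  rw [PySem.List.pyGetD_eq_getElem _ 0 hi0
    (by simp [costsList, hlc]; omega)]
  rw [List.getElem_reverse]
  simp only [costsList, List.getElem_map, List.getElem_range, List.length_map, List.length_range,
    List.length_reverse, hlc]
  have hget : ((PySem.List.pyRange 0 n 1).map (fun j => PySem.List.pyGetD a j 0 + j)).reverse.getD
      (n.toNat - 1 - i.toNat) 0 = PySem.List.pyGetD a i 0 + i := by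
    rw [List.getD_eq_getElem _ _ (by simp [hlc]; omega), List.getElem_reverse]
    simp only [List.getElem_map, PySem.List.getElem_pyRange_one, hlc]
    rw [show (0 : Int) + (((n.toNat - 1 - (n.toNat - 1 - i.toNat) : Nat)) : Int) = i from by omega]
  have htake : ((PySem.List.pyRange 0 n 1).map (fun j => PySem.List.pyGetD a j 0 + j)).reverse.take
      (n.toNat - 1 - i.toNat + 1)
      = ((PySem.List.pyRange i n 1).map (fun j => PySem.List.pyGetD a j 0 + j)).reverse := by
    rw [List.take_reverse]
    congr 1
    rw [hlc, show n.toNat - (n.toNat - 1 - i.toNat + 1) = i.toNat by omega]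
    rw [PySem.List.pyRange_one_append 0 i n (by omega) (by omega), List.map_append]
    rw [List.drop_left' (by simp [PySem.List.length_pyRange_one]; try omega)]
  rw [hget, htake]
  rw [costIn_perm _ (List.reverse_perm _)]
  simp [costIn, List.map_map, Function.comp_def]

-- ===== VERDICT (by name: the statement is the Claim_ definition above) =====
theorem solve_spec : Claim_equal_solve := by
  intro a n _ _
  unfold Spec_solve solve solve_alt
  apply PySem.List.foldl_congr_mem
  intro acc i hi
  rw [PySem.List.mem_pyRange_one] at hi
  obtain ⟨hi0, hin⟩ := hi
  simp only
  rw [solveInner_snd]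
  by_cases hv : ∀ j ∈ PySem.List.pyRange 0 n 1, PySem.List.pyGetD a i 0 - |i - j| > 0
  · rw [if_pos (by simpa using hv),
      if_pos ((valid_iff (PySem.List.pyGetD a i 0) i n hi0 hin).1 hv),
      solveInner_fst a i _ 0 hv, cost_eq a n i hi0 hin,
      left_at a n i hi0 hin, right_at a n i hi0 hin,
      PySem.List.pyRange_one_cons (by omega : i < n)]
    simp
  · rw [if_neg (by simpa using hv),
      if_neg (fun hc => hv ((valid_iff (PySem.List.pyGetD a i 0) i n hi0 hin).2 hc))]
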